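-- pv_equiv track=rewrite | github.com/Parvez13/Placement_Assignment-Sohail_Parvez- | Pre_Placement/Assignment/Arrays2D_Lecture_2/question_2.py | get_candies
-- ===== SOURCE A (Python) =====
-- def get_candies(candies):
--     if len(candies)%2 != 0:
--         return 0
--     unique_candies = 0
--     for i in range(len(candies)):
--         for j in range(0,i):
--             if candies[i] == candies[j]:
--                 break
--         else:
--             unique_candies += 1
--     return max(unique_candies, len(candies)//2)
-- ===== SOURCE B (Python) =====
-- def get_candies(candies):
--     if len(candies) % 2 != 0:
--         return 0
--     return max(len(set(candies)), len(candies) // 2)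
-- ===== Notes on version B (the rewrite author's own statement) =====
-- stated objective: simpler
-- what changed: Replaces the quadratic nested-scan first-occurrence count with a single distinct count via len(set(candies)).
import Mathlib
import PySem

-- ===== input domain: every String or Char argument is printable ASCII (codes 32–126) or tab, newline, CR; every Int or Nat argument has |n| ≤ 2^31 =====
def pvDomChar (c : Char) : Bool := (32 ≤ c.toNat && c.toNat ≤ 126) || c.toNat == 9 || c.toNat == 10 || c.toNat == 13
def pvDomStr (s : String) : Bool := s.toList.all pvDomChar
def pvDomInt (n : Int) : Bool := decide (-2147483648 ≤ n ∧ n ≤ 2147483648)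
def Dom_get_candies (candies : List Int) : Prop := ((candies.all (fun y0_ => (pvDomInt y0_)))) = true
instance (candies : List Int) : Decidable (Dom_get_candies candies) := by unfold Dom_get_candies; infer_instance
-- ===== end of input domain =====

-- B replaces A's nested first-occurrence scan with a single distinct count via len(set(candies)) — simpler.

-- ===== PORT A =====
-- inner 'for j in range(0,i): if candies[i]==candies[j]: break / else:' — true ↔ the loop completes without break
-- (indices produced by range(...) are always in range here, so pyGetD's default is never used)
def pvInnerA (candies : List Int) (i : Int) : List Int → Bool
  | [] => true
  | j :: rest =>
      if PySem.List.pyGetD candies i 0 == PySem.List.pyGetD candies j 0 then false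
      else pvInnerA candies i rest

def get_candies (candies : List Int) : Int :=
  if PySem.Int.mod (PySem.List.len candies) 2 ≠ 0 then 0
  else
    let unique_candies : Int :=
      (PySem.List.pyRange 0 (PySem.List.len candies) 1).foldl
        (fun acc i =>
          if pvInnerA candies i (PySem.List.pyRange 0 i 1) then acc + 1 else acc) 0
    max unique_candies (PySem.Int.floordiv (PySem.List.len candies) 2)

-- ===== PORT B =====
def get_candies_alt (candies : List Int) : Int :=
  if PySem.Int.mod (PySem.List.len candies) 2 ≠ 0 then 0
  else max (PySem.Set.len (PySem.Set.ofList candies)) (PySem.Int.floordiv (PySem.List.len candies) 2)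

-- ===== PRECONDITION & SPEC =====
def Spec_get_candies (candies : List Int) (out : Int) : Prop := out = get_candies_alt candies
instance (candies : List Int) (out : Int) : Decidable (Spec_get_candies candies out) := by unfold Spec_get_candies; infer_instance

-- ===== CLAIM (what is proved, stated in full; the proofs are below) =====
def Claim_equal_get_candies : Prop := ∀ (candies : List Int), Dom_get_candies candies → Spec_get_candies candies (get_candies candies)

-- ===== LEMMAS AND PROOFS =====

lemma pvInnerA_eq_all (c : List Int) (i : Int) (js : List Int) :
    pvInnerA c i js = js.all (fun j => !(PySem.List.pyGetD c i 0 == PySem.List.pyGetD c j 0)) := by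
  induction js with
  | nil => rfl
  | cons j rest ih =>
    by_cases h : PySem.List.pyGetD c i 0 = PySem.List.pyGetD c j 0 <;> simp [pvInnerA, ih, h]

lemma pyGetD_append_lt (xs : List Int) (x : Int) (i : Int) (h0 : 0 ≤ i) (hl : i < xs.length) :
    PySem.List.pyGetD (xs ++ [x]) i 0 = PySem.List.pyGetD xs i 0 := by
  rw [PySem.List.pyGetD_eq_getElem (xs ++ [x]) 0 h0 (by simp; omega),
      PySem.List.pyGetD_eq_getElem xs 0 h0 hl]
  exact List.getElem_append_left (by omega)

lemma pvInnerA_congr (c d : List Int) (i : Int) (js : List Int)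
    (hij : PySem.List.pyGetD c i 0 = PySem.List.pyGetD d i 0)
    (h : ∀ j ∈ js, PySem.List.pyGetD c j 0 = PySem.List.pyGetD d j 0) :
    pvInnerA c i js = pvInnerA d i js := by
  induction js with
  | nil => rfl
  | cons j rest ih =>
    simp only [pvInnerA, hij, h j (by simp)]
    split <;> [rfl; exact ih (fun j hj => h j (by simp [hj]))]

lemma pvInnerA_append (xs : List Int) (x : Int) (i : Int) (hi : 0 ≤ i) (hlt : i < xs.length) :
    pvInnerA (xs ++ [x]) i (PySem.List.pyRange 0 i 1) = pvInnerA xs i (PySem.List.pyRange 0 i 1) := by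
  refine pvInnerA_congr _ _ _ _ (pyGetD_append_lt xs x i hi hlt) (fun j hj => ?_)
  have hj' := PySem.List.mem_pyRange_one.mp hj
  exact pyGetD_append_lt xs x j hj'.1 (by omega)

lemma pvInnerA_range (xs : List Int) (x : Int) :
    pvInnerA (xs ++ [x]) (xs.length) (PySem.List.pyRange 0 xs.length 1) = !(xs.contains x) := by
  rw [pvInnerA_eq_all]
  have hx : PySem.List.pyGetD (xs ++ [x]) (xs.length : Int) 0 = x := by
    rw [PySem.List.pyGetD_natCast]
    simp [List.getD]
  by_cases hmem : x ∈ xs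
  · have hc : xs.contains x = true := by simpa using hmem
    rw [hc, Bool.not_true]
    obtain ⟨k, hk, hkx⟩ := List.mem_iff_getElem.mp hmem
    rw [List.all_eq_false]
    refine ⟨(k : Int), PySem.List.mem_pyRange_one.mpr (by constructor <;> omega), ?_⟩
    rw [hx, pyGetD_append_lt xs x k (by omega) (by exact_mod_cast hk), PySem.List.pyGetD_natCast]
    simp [List.getD, hk, hkx]
  · have hc : xs.contains x = false := by simpa using hmem
    rw [hc, Bool.not_false, List.all_eq_true]
    intro j hj
    have hj' := PySem.List.mem_pyRange_one.mp hj
    rw [hx, pyGetD_append_lt xs x j hj'.1 (by omega),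
        PySem.List.pyGetD_eq_getElem xs 0 hj'.1 (by omega)]
    simp only [Bool.not_eq_eq_eq_not, Bool.not_true, beq_eq_false_iff_ne, ne_eq]
    intro h; exact absurd (h ▸ List.getElem_mem _) hmem

lemma unique_eq_set_len (xs : List Int) :
    (PySem.List.pyRange 0 (xs.length : Int) 1).foldl
      (fun acc i => if pvInnerA xs i (PySem.List.pyRange 0 i 1) then acc + 1 else acc) 0
    = PySem.Set.len (PySem.Set.ofList xs) := by
  induction xs using List.reverseRecOn with
  | nil => rfl
  | append_singleton xs x ih =>
    have hlen : ((xs ++ [x]).length : Int) = (xs.length : Int) + 1 := by simp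
    rw [hlen, PySem.List.pyRange_one_succ_right (by positivity), List.foldl_append]
    rw [PySem.List.foldl_congr_mem (PySem.List.pyRange 0 (xs.length : Int) 1) _
        (fun acc i => if pvInnerA xs i (PySem.List.pyRange 0 i 1) then acc + 1 else acc) 0
        (fun acc i hi => by
          have hi' := PySem.List.mem_pyRange_one.mp hi
          rw [pvInnerA_append xs x i hi'.1 (by exact_mod_cast hi'.2)])]
    rw [ih]
    simp only [List.foldl, pvInnerA_range]
    have hsplit : PySem.Set.ofList (xs ++ [x]) = PySem.Set.add (PySem.Set.ofList xs) x := by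
      rw [PySem.Set.ofList_eq_foldl, PySem.Set.ofList_eq_foldl, List.foldl_append]
      rfl
    rw [hsplit]
    unfold PySem.Set.add
    by_cases hmem : x ∈ xs <;> simp [hmem]

-- ===== VERDICT (by name: the statement is the Claim_ definition above) =====
theorem get_candies_spec : Claim_equal_get_candies := by
  intro candies _
  unfold Spec_get_candies get_candies get_candies_alt
  simp only [PySem.List.len_eq]
  split
  · rfl
  · rw [unique_eq_set_len]
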